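-- pv_equiv track=rewrite | github.com/fellamch22/Ls-Logo | interpreter.py | next_instruction
-- ===== SOURCE A (Python) =====
-- def next_instruction(instruction,program):
--
--     kiter = list(program)
--
--     i = 0
--     res = None
--
--     for k in kiter :
--
--         if k == instruction :
--
--             res = kiter[i+1] if i+1 < len(kiter) else None
--
--         i +=1
--     return res
-- ===== SOURCE B (Python) =====
-- def next_instruction(instruction, program):
--     kiter = list(program)
--     if instruction not in kiter:
--         return None
--     j = len(kiter) - 1 - list(reversed(kiter)).index(instruction)
--     return kiter[j + 1] if j + 1 < len(kiter) else None
-- ===== Notes on version B (the rewrite author's own statement) =====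
-- stated objective: idiomatic
-- what changed: B has no scanning loop of its own: it tests membership, locates the last occurrence with list.index on the reversed list, and indexes once, instead of A's forward pass that overwrites res on every match.
import Mathlib
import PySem

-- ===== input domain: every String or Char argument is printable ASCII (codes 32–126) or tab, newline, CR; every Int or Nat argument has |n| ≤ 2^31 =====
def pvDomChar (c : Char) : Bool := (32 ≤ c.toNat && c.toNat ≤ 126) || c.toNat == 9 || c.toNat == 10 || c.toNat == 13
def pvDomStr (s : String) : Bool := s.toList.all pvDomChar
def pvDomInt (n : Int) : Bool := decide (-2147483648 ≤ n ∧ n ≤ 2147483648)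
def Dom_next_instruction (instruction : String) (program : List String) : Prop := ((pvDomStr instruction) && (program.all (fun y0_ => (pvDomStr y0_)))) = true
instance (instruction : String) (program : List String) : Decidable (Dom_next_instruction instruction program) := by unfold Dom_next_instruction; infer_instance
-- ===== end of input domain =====

-- B replaces A's forward overwrite-on-every-match loop by membership + list.index on the
-- reversed list (last occurrence) + a single indexing step (idiomatic, no loop of its own).

-- ===== PORT A =====
-- the for-loop of A: state (i, res), one step per element k of kiter
def nextInstrALoop (instruction : String) (kiter : List String) (i : Int) (res : Option String) :
    List String → Option String
  | [] => res
  | k :: rest =>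
      nextInstrALoop instruction kiter (i + 1)
        (if k == instruction then
           (if i + 1 < (kiter.length : Int) then PySem.List.pyGet? kiter (i + 1) else none)
         else res) rest

def next_instruction (instruction : String) (program : List String) : Option String :=
  let kiter := program
  nextInstrALoop instruction kiter 0 none kiter

-- ===== PORT B =====
-- list(reversed(kiter)) is kiter.reverse; .index is PySem.List.index? (cannot raise here:
-- it is guarded by the membership test, so the none branch is unreachable)
def next_instruction_alt (instruction : String) (program : List String) : Option String :=
  let kiter := program
  if instruction ∈ kiter then
    match PySem.List.index? kiter.reverse instruction with
    | some r =>
        let j : Int := (kiter.length : Int) - 1 - (r : Int)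
        if j + 1 < (kiter.length : Int) then PySem.List.pyGet? kiter (j + 1) else none
    | none => none
  else none

-- ===== PRECONDITION & SPEC =====
def Spec_next_instruction (instruction : String) (program : List String) (out : Option String) : Prop := out = next_instruction_alt instruction program
instance (instruction : String) (program : List String) (out : Option String) : Decidable (Spec_next_instruction instruction program out) := by unfold Spec_next_instruction; infer_instance

-- ===== CLAIM (what is proved, stated in full; the proofs are below) =====
def Claim_equal_next_instruction : Prop := ∀ (instruction : String) (program : List String), Dom_next_instruction instruction program → Spec_next_instruction instruction program (next_instruction instruction program)

-- ===== LEMMAS AND PROOFS =====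

-- index (w.r.t. kiter, head of l having index i) of the last element of l equal to ins
def lastMatch (ins : String) : List String → Int → Option Int
  | [], _ => none
  | k :: rest, i => (lastMatch ins rest (i + 1)).or (if k == ins then some i else none)

-- the value both programs produce for a match at index j
def nxtVal (kiter : List String) (j : Int) : Option String :=
  if j + 1 < (kiter.length : Int) then PySem.List.pyGet? kiter (j + 1) else none

theorem nextInstrALoop_eq (ins : String) (kiter : List String) :
    ∀ (l : List String) (i : Int) (res : Option String),
      nextInstrALoop ins kiter i res l =
        (match lastMatch ins l i with
         | some j => nxtVal kiter j
         | none => res) := by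
  intro l
  induction l with
  | nil => intro i res; rfl
  | cons k rest ih =>
      intro i res
      simp only [nextInstrALoop, lastMatch, ih]
      cases h : lastMatch ins rest (i + 1) with
      | some j => simp [Option.or]
      | none =>
          by_cases hk : k == ins <;> simp [hk, Option.or, nxtVal]

-- lastMatch is what B's reversed-index computes
theorem lastMatch_eq_index_reverse (ins : String) :
    ∀ (l : List String) (s : Int),
      lastMatch ins l s =
        (PySem.List.index? l.reverse ins).map
          (fun r : Nat => s + ((l.length : Int) - 1 - (r : Int))) := by
  intro l
  induction l with
  | nil => intro s; rfl
  | cons x xs ih =>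
      intro s
      simp only [lastMatch, ih, List.reverse_cons]
      by_cases hm : ins ∈ xs
      · have hmem : ins ∈ xs.reverse := by simpa using hm
        rw [PySem.List.index?_append_of_mem _ hmem]
        obtain ⟨r, hr⟩ := Option.isSome_iff_exists.1 ((PySem.List.index?_isSome_iff _ _).2 hmem)
        rw [hr]
        simp only [Option.map_some, Option.or, List.length_cons]
        congr 1
        push_cast
        ring
      · have hrev : ins ∉ xs.reverse := by simpa using hm
        rw [(PySem.List.index?_eq_none_iff _ _).2 hrev]
        by_cases hx : x == ins
        · have hxe : x = ins := by simpa using hx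
          subst hxe
          rw [PySem.List.index?_append_singleton_self _ _ hrev]
          simp only [Option.map_none, Option.map_some, Option.or, hx,
            List.length_reverse, List.length_cons, if_true]
          congr 1
          push_cast
          ring
        · have hni : ins ∉ xs.reverse ++ [x] := by
            simp only [List.mem_append, List.mem_singleton]
            rintro (h | h)
            · exact hrev h
            · exact hx (by simp [h.symm])
          rw [(PySem.List.index?_eq_none_iff _ _).2 hni]
          simp [hx]

-- ===== VERDICT (by name: the statement is the Claim_ definition above) =====
theorem next_instruction_spec : Claim_equal_next_instruction := by
  intro instruction program _
  show next_instruction instruction program = next_instruction_alt instruction program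
  unfold next_instruction next_instruction_alt
  rw [nextInstrALoop_eq, lastMatch_eq_index_reverse]
  by_cases hm : instruction ∈ program
  · have hmem : instruction ∈ program.reverse := by simpa using hm
    obtain ⟨r, hr⟩ := Option.isSome_iff_exists.1 ((PySem.List.index?_isSome_iff _ _).2 hmem)
    rw [hr, if_pos hm]
    have hr' : List.idxOf? instruction program.reverse = some r := by
      rw [← PySem.List.index?_eq_idxOf?]; exact hr
    simp [nxtVal, hr']
  · rw [(PySem.List.index?_eq_none_iff _ _).2 (by simpa using hm), if_neg hm]
    simp
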